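-- pv_equiv track=rewrite | github.com/ndnguyen1/raspberryred | rocketry/Mason's Sims/PTI/PSSE35/EXAMPLE/pout_report.py | busindexes
-- ===== SOURCE A (Python) =====
-- def busindexes(busnum, busnumlist):
--     '''Find indexes of a bus in list of buses.
--     Returns list with indexes of 'busnum' in 'busnumlist'.
--     '''
--     busidxes = []
--     startidx = 0
--     buscounts = busnumlist.count(busnum)
--     if buscounts:
--         for i in range(buscounts):
--             tmpidx = busnumlist.index(busnum,startidx)
--             busidxes.append(tmpidx)
--             startidx = tmpidx+1
--     return busidxes
-- ===== SOURCE B (Python) =====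
-- def busindexes(busnum, busnumlist):
--     '''Find indexes of a bus in list of buses.
--     Returns list with indexes of 'busnum' in 'busnumlist'.
--     '''
--     return [i for i, v in enumerate(busnumlist) if v == busnum]
-- ===== Notes on version B (the rewrite author's own statement) =====
-- stated objective: simpler
-- what changed: Replaces A's count-then-repeated-.index rescans (each .index re-scans from a moving start) with a single enumerate pass that collects matching indexes directly.
import Mathlib
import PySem

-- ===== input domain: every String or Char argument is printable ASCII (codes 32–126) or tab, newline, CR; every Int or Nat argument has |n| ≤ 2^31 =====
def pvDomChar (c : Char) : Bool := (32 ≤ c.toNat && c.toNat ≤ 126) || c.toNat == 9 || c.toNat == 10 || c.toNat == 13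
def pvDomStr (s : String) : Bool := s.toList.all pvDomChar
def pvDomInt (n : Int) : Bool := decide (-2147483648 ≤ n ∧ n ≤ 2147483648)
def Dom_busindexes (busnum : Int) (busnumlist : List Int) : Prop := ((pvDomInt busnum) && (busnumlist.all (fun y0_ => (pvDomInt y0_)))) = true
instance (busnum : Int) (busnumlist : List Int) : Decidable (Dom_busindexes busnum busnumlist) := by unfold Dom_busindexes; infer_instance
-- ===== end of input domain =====

-- B replaces A's count-then-repeated-.index rescans with one enumerate pass collecting matches (simpler; return value only).

-- ===== PORT A =====
-- busnumlist.index(busnum, startidx) is ported as index? on the dropped prefix plus startidx;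
-- the none branch (Python's ValueError) is unreachable because the loop runs count times.
def busindexes (busnum : Int) (busnumlist : List Int) : List Int :=
  let buscounts := busnumlist.count busnum
  if buscounts ≠ 0 then
    ((List.range buscounts).foldl
      (fun (st : List Int × Nat) _ =>
        match PySem.List.index? (busnumlist.drop st.2) busnum with
        | some j => (st.1 ++ [((st.2 + j : Nat) : Int)], st.2 + j + 1)
        | none => st)
      ([], 0)).1
  else []

-- ===== PORT B =====
-- [i for i, v in enumerate(busnumlist) if v == busnum]
def busindexes_alt (busnum : Int) (busnumlist : List Int) : List Int :=
  (PySem.List.enumerate busnumlist).foldr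
    (fun p acc => if p.2 == busnum then p.1 :: acc else acc) []

-- ===== PRECONDITION & SPEC =====
def Spec_busindexes (busnum : Int) (busnumlist : List Int) (out : List Int) : Prop := out = busindexes_alt busnum busnumlist
instance (busnum : Int) (busnumlist : List Int) (out : List Int) : Decidable (Spec_busindexes busnum busnumlist out) := by unfold Spec_busindexes; infer_instance

-- ===== CLAIM (what is proved, stated in full; the proofs are below) =====
def Claim_equal_busindexes : Prop := ∀ (busnum : Int) (busnumlist : List Int), Dom_busindexes busnum busnumlist → Spec_busindexes busnum busnumlist (busindexes busnum busnumlist)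

-- ===== LEMMAS AND PROOFS =====

-- reference function: indexes (as Ints) of v in ys, positions counted from s
def pvG (v : Int) : List Int → Nat → List Int
  | [], _ => []
  | a :: t, s => if a = v then (s : Int) :: pvG v t (s + 1) else pvG v t (s + 1)

theorem pvG_count_zero (v : Int) (ys : List Int) (s : Nat) (h : ys.count v = 0) :
    pvG v ys s = [] := by
  induction ys generalizing s with
  | nil => rfl
  | cons a t ih =>
    rw [List.count_cons] at h
    simp only [pvG]
    split_ifs with ha
    · subst ha; simp at h
    · exact ih _ (by omega)

theorem pvG_find (v : Int) (ys : List Int) (j s : Nat)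
    (h : PySem.List.index? ys v = some j) :
    pvG v ys s = ((s + j : Nat) : Int) :: pvG v (ys.drop (j + 1)) (s + j + 1) := by
  induction ys generalizing j s with
  | nil => simp [PySem.List.index?] at h
  | cons a t ih =>
    by_cases ha : a = v
    · subst ha
      rw [PySem.List.index?_cons_self] at h
      cases h
      simp [pvG]
    · rw [PySem.List.index?_cons_of_ne t ha] at h
      cases hj : PySem.List.index? t v with
      | none => rw [hj] at h; simp at h
      | some j' =>
        rw [hj] at h
        simp only [Option.map_some] at h
        cases h
        simp only [pvG, if_neg ha, List.drop_succ_cons]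
        rw [ih j' (s + 1) hj]
        congr 1
        · congr 1; omega
        · congr 1; omega

theorem pvCount_find (v : Int) (ys : List Int) (j : Nat)
    (h : PySem.List.index? ys v = some j) :
    ys.count v = (ys.drop (j + 1)).count v + 1 := by
  induction ys generalizing j with
  | nil => simp [PySem.List.index?] at h
  | cons a t ih =>
    by_cases ha : a = v
    · subst ha
      rw [PySem.List.index?_cons_self] at h
      cases h
      simp
    · rw [PySem.List.index?_cons_of_ne t ha] at h
      cases hj : PySem.List.index? t v with
      | none => rw [hj] at h; simp at h
      | some j' =>
        rw [hj] at h
        simp only [Option.map_some] at h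
        cases h
        simp only [List.drop_succ_cons]
        have := ih j' hj
        simp [ha] at this ⊢
        omega

-- A's loop body
def pvStep (busnum : Int) (busnumlist : List Int) (st : List Int × Nat) : List Int × Nat :=
  match PySem.List.index? (busnumlist.drop st.2) busnum with
  | some j => (st.1 ++ [((st.2 + j : Nat) : Int)], st.2 + j + 1)
  | none => st

theorem pvFoldl_ignore {α β : Type} (f : β → β) (l : List α) (st : β) :
    l.foldl (fun s _ => f s) st = f^[l.length] st := by
  induction l generalizing st with
  | nil => rfl
  | cons a t ih => simp [List.foldl_cons, ih, Function.iterate_succ_apply]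

theorem pvLoop_inv (busnum : Int) (busnumlist : List Int) :
    ∀ (n : Nat) (acc : List Int) (s : Nat),
      (busnumlist.drop s).count busnum = n →
      ((pvStep busnum busnumlist)^[n] (acc, s)).1 = acc ++ pvG busnum (busnumlist.drop s) s := by
  intro n
  induction n with
  | zero =>
    intro acc s h
    simp [pvG_count_zero busnum _ s h]
  | succ m ih =>
    intro acc s h
    cases hj : PySem.List.index? (busnumlist.drop s) busnum with
    | none =>
      have : busnum ∉ busnumlist.drop s := (PySem.List.index?_eq_none_iff _ _).mp hj
      rw [List.count_eq_zero.mpr this] at h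
      omega
    | some j =>
      rw [Function.iterate_succ_apply]
      have hstep : pvStep busnum busnumlist (acc, s)
          = (acc ++ [((s + j : Nat) : Int)], s + j + 1) := by
        simp only [pvStep]
        rw [hj]
      rw [hstep]
      have hcnt : (busnumlist.drop (s + j + 1)).count busnum = m := by
        have h2 := pvCount_find busnum _ j hj
        rw [List.drop_drop] at h2
        rw [Nat.add_assoc s j 1]
        omega
      rw [ih _ _ hcnt]
      rw [pvG_find busnum _ j s hj, List.drop_drop]
      simp [Nat.add_assoc]

theorem pvAlt_eq_pvG (busnum : Int) (busnumlist : List Int) :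
    busindexes_alt busnum busnumlist = pvG busnum busnumlist 0 := by
  suffices h : ∀ (ys : List Int) (s : Nat),
      (PySem.List.enumerate ys (s : Int)).foldr
        (fun p acc => if p.2 == busnum then p.1 :: acc else acc) []
      = pvG busnum ys s by
    have := h busnumlist 0
    simpa [busindexes_alt] using this
  intro ys
  induction ys with
  | nil => intro s; simp [PySem.List.enumerate_nil, pvG]
  | cons a t ih =>
    intro s
    rw [PySem.List.enumerate_cons]
    simp only [List.foldr_cons, pvG]
    have : ((s : Int) + 1) = ((s + 1 : Nat) : Int) := by push_cast; ring
    rw [this, ih (s + 1)]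
    by_cases ha : a = busnum
    · simp [ha]
    · simp [ha]

-- ===== VERDICT (by name: the statement is the Claim_ definition above) =====
theorem busindexes_spec : Claim_equal_busindexes := by
  intro busnum busnumlist _
  unfold Spec_busindexes busindexes
  rw [pvAlt_eq_pvG]
  simp only []
  by_cases h : busnumlist.count busnum = 0
  · simp [h, pvG_count_zero busnum busnumlist 0 h]
  · rw [if_pos h]
    have hfold : (List.range (busnumlist.count busnum)).foldl
        (fun (st : List Int × Nat) _ =>
          match PySem.List.index? (busnumlist.drop st.2) busnum with
          | some j => (st.1 ++ [((st.2 + j : Nat) : Int)], st.2 + j + 1)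
          | none => st)
        ([], 0)
        = (pvStep busnum busnumlist)^[(List.range (busnumlist.count busnum)).length] ([], 0) := by
      exact pvFoldl_ignore (pvStep busnum busnumlist) _ _
    rw [hfold, List.length_range]
    have := pvLoop_inv busnum busnumlist (busnumlist.count busnum) [] 0 (by simp)
    simpa using this
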